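-- pv_equiv track=rewrite | github.com/jsculsp/data-structures-and-algorithms-in-python | ch03/exercises.py | example5
-- ===== SOURCE A (Python) =====
-- def example5(A, B):  # assume that A and B have equal length
--     """Return the number of elements in B equal to the sum of prefix sums in A."""
--     n = len(A)
--     count = 0
--     for i in range(n):  # loop from 0 to n-1
--         total = 0
--         for j in range(n):  # loop from 0 to n-1
--             for k in range(1 + j):  # loop from 0 to j
--                 total += A[k]
--         if B[i] == total:
--             count += 1
--     return count
-- ===== SOURCE B (Python) =====
-- def example5(A, B):  # assume that A and B have equal length
--     """Return the number of elements in B equal to the sum of prefix sums in A."""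
--     n = len(A)
--     total = sum((n - k) * v for k, v in enumerate(A))
--     return sum(1 for x in B[:n] if x == total)
-- ===== Notes on version B (the rewrite author's own statement) =====
-- stated objective: faster
-- what changed: Replaces A's triple nested loop (which recomputes the same sum of prefix sums for every i) by computing the total once in a single pass as sum((n-k)*A[k]) and then counting matches in B[:n].
import Mathlib
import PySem

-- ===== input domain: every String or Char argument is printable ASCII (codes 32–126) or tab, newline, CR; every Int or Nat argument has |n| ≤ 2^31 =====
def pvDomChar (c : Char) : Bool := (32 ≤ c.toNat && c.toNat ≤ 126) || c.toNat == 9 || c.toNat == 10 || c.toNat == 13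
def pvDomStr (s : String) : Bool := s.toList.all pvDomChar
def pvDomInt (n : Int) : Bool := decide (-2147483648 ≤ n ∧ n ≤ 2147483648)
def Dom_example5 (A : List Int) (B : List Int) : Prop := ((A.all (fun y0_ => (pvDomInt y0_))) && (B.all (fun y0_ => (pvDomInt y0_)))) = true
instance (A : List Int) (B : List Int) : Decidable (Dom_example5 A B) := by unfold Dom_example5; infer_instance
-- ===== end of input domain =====

-- B replaces A's O(n^4) triple loop by computing the total once as sum (n-k)*A[k] and counting matches in B[:n] (faster, asymptotic).

-- ===== PORT A =====
def example5 (A : List Int) (B : List Int) : Int :=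
  let n : Int := PySem.List.len A
  (PySem.List.pyRange 0 n).foldl (fun count i =>
    let total :=
      (PySem.List.pyRange 0 n).foldl (fun total j =>
        (PySem.List.pyRange 0 (1 + j)).foldl (fun t k => t + PySem.List.pyGetD A k 0) total) 0
    if PySem.List.pyGetD B i 0 == total then count + 1 else count) 0

-- ===== PORT B =====
def example5_alt (A : List Int) (B : List Int) : Int :=
  let n : Int := PySem.List.len A
  let total := ((PySem.List.enumerate A).map (fun kv => (n - kv.1) * kv.2)).sum
  (PySem.List.slice B none (some n)).foldl (fun c x => if x == total then c + 1 else c) 0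

-- ===== PRECONDITION & SPEC =====
-- A indexes B[i] for every i < len(A): it raises IndexError when len(B) < len(A); exactly those inputs are excluded.
def Pre_example5 (A : List Int) (B : List Int) : Prop := A.length ≤ B.length
instance (A : List Int) (B : List Int) : Decidable (Pre_example5 A B) := by unfold Pre_example5; infer_instance
def pvWitness_example5 : List Int × List Int := ([1, 2, 3], [10, 9, 10])
def Spec_example5 (A : List Int) (B : List Int) (out : Int) : Prop := out = example5_alt A B
instance (A : List Int) (B : List Int) (out : Int) : Decidable (Spec_example5 A B out) := by unfold Spec_example5; infer_instance

-- ===== CLAIM (what is proved, stated in full; the proofs are below) =====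
def Claim_equal_example5 : Prop := ∀ (A : List Int) (B : List Int), Dom_example5 A B → Pre_example5 A B → Spec_example5 A B (example5 A B)

-- ===== LEMMAS AND PROOFS =====

-- Swapping the order of summation: the sum of the prefix sums of g over range m equals sum of (m-k)*g k.
theorem pv_sum_prefix (g : Nat → Int) :
    ∀ m : Nat, ((List.range m).map (fun j => ((List.range (j + 1)).map g).sum)).sum
      = ((List.range m).map (fun (k : Nat) => ((m : Int) - (k : Int)) * g k)).sum := by
  intro m
  induction m with
  | zero => simp
  | succ m ih =>
    have h2 : ((List.range (m + 1)).map (fun (k : Nat) => (((m : Int) + 1) - (k : Int)) * g k)).sum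
        = ((List.range (m + 1)).map (fun (k : Nat) => ((m : Int) - (k : Int)) * g k)).sum
          + ((List.range (m + 1)).map g).sum := by
      rw [← PySem.List.sum_map_add_int]
      exact congrArg _ (List.map_congr_left (fun k _ => by ring))
    have h3 : ((List.range (m + 1)).map (fun (k : Nat) => ((m : Int) - (k : Int)) * g k)).sum
        = ((List.range m).map (fun (k : Nat) => ((m : Int) - (k : Int)) * g k)).sum := by
      rw [List.range_succ, List.map_append, List.sum_append]; simp
    conv_lhs => rw [List.range_succ, List.map_append, List.sum_append, ih]
    push_cast
    rw [h2, h3]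
    simp

theorem pv_totals_eq (A : List Int) :
    (PySem.List.pyRange 0 (PySem.List.len A)).foldl (fun total j =>
        (PySem.List.pyRange 0 (1 + j)).foldl (fun t k => t + PySem.List.pyGetD A k 0) total) (0 : Int)
    = ((PySem.List.enumerate A).map (fun kv => ((PySem.List.len A) - kv.1) * kv.2)).sum := by
  rw [PySem.List.enumerate_eq_map_pyRange A 0, List.map_map]
  simp only [PySem.List.foldl_add, zero_add, PySem.List.len_eq, Function.comp_def]
  rw [PySem.List.pyRange_zero_nat, List.map_map, List.map_map]
  have hc : ∀ j ∈ List.range A.length,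
      ((PySem.List.pyRange 0 (1 + ((j : Nat) : Int))).map (fun k => PySem.List.pyGetD A k 0)).sum
      = ((List.range (j + 1)).map (fun k => A.getD k 0)).sum := by
    intro j _
    have : (1 : Int) + (j : Int) = ((j + 1 : Nat) : Int) := by push_cast; ring
    rw [this, PySem.List.pyRange_zero_nat, List.map_map]
    exact congrArg _ (List.map_congr_left (fun k _ => by simp))
  calc _ = ((List.range A.length).map (fun j => ((List.range (j + 1)).map (fun k => A.getD k 0)).sum)).sum := by
          refine congrArg _ (List.map_congr_left (fun j hj => ?_))
          simp only [Function.comp_def]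
          exact hc j hj
    _ = ((List.range A.length).map (fun (k : Nat) => ((A.length : Int) - (k : Int)) * A.getD k 0)).sum :=
          pv_sum_prefix (fun k => A.getD k 0) A.length
    _ = _ := by
          refine (congrArg _ (List.map_congr_left (fun k _ => ?_))).symm
          simp

theorem pv_count_eq (B : List Int) (n : Nat) (h : n ≤ B.length) (T : Int) :
    (PySem.List.pyRange 0 (n : Int)).foldl
      (fun c i => if PySem.List.pyGetD B i 0 == T then c + 1 else c) (0 : Int)
    = (((B.take n).count T : Nat) : Int) := by
  have hlen : (B.take n).length = n := List.length_take_of_le h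
  have hcongr : (PySem.List.pyRange 0 (n : Int)).foldl
      (fun c i => if PySem.List.pyGetD B i 0 == T then c + 1 else c) (0 : Int)
      = (PySem.List.pyRange 0 (n : Int)).foldl
      (fun c i => if PySem.List.pyGetD (B.take n) i 0 == T then c + 1 else c) 0 := by
    refine PySem.List.foldl_congr_mem _ _ _ _ (fun c i hi => ?_)
    rw [PySem.List.mem_pyRange_one] at hi
    obtain ⟨h0, hn⟩ := hi
    obtain ⟨k, rfl⟩ : ∃ k : Nat, i = (k : Int) := ⟨i.toNat, (Int.toNat_of_nonneg h0).symm⟩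
    have hk : k < n := by exact_mod_cast hn
    rw [PySem.List.pyGetD_natCast, PySem.List.pyGetD_natCast]
    simp [List.getD_eq_getElem?_getD, hk]
  have h2 := PySem.List.foldl_pyRange_zero_pyGetD' (B.take n) 0
    (fun c x => if x == T then c + 1 else c) (0 : Int)
  rw [hlen] at h2
  rw [hcongr, h2, PySem.List.foldl_beq_add_one, zero_add]

-- ===== VERDICT (by name: the statement is the Claim_ definition above) =====
theorem example5_spec : Claim_equal_example5 := by
  intro A B _ hpre
  show example5 A B = example5_alt A B
  simp only [example5, example5_alt]
  rw [pv_totals_eq A]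
  simp only [PySem.List.len_eq, PySem.List.slice_to_natCast]
  refine (pv_count_eq B A.length hpre _).trans ?_
  exact ((PySem.List.foldl_beq_add_one (List.take A.length B) _ 0).trans (zero_add _)).symm
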